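/- GENERATED by mk_final_copies.py from the proof of the farm's unit `start_decoder.C4a` (farm:start_decoder.C4a.1: Proof.lean) as the
   re-elaboration sweep compiled it — do not edit. -/
import Asan.CheckWalk
import Vorbis.Spec.Reader
import Vorbis.Spec.Units.start_decoder_C4a
import Vorbis.Spec.Worked.start_decoder_C4a_Lemmas

open X86 X86.User Asan Vorbis Vorbis.Spec Vorbis.Spec.StartDecoder

set_option maxRecDepth 4000
set_option maxHeartbeats 4000000

namespace Vorbis.Spec.start_decoder_C4a

/-- **Segment C4a of `start_decoder`** (`cut122` 0x1147c3, the head of loop 3786): the two checked loads of `c->entries` and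
`c->sparse` (inside the codebooks block: `ArenaOK.block_acc_inv`); `j ≥ entries`: the exit `AtC5` (`c4a_exit_c5`); else ONE call of
`get_bits` on either arm (`C4.reader_pre`) and `InC4Mid` at its return (`C4.mid_of_call`): `cut121` (dense, `get_bits(f, 5)`, `rax <
32`) or `cut123` (sparse, `get_bits(f, 1)`). One walk; the memory changes are stated ONCE per exit as a `C4.Agree`. -/
theorem segC4a_walk {Lay : Layout} (hLay : Lay.hi = 0x1000000) {μ : Microarch} (hμ : UserX.MicroOK μ) {u₀ : State}
    (hcode : HasCodeNat Lay u₀ Vorbis.L.start_decoder.entry Vorbis.Code.code_start_decoder.nat Vorbis.L.start_decoder.size)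
    (hgb : ∀ (others : List Obj) (frames : List (Nat × FrameLayout)) (Blk : Block → Prop) (len : Nat), Calls Lay μ Vorbis.WayInv (Vorbis.conv u₀) Vorbis.L.get_bits.entry (Vorbis.Spec.get_bits.spec others frames Blk len))
    (hld4 : Asan.SmallCheck Lay μ Vorbis.WayInv (Vorbis.CodeOK u₀) [.rax, .rcx, .rdx] 4 Vorbis.L.__asan_load4_noabort.entry)
    (hld1 : Asan.SmallCheck Lay μ Vorbis.WayInv (Vorbis.CodeOK u₀) [.rax, .rdx] 1 Vorbis.L.__asan_load1_noabort.entry)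
    {g : Ghost} {i : Nat} {A2 A3 Ai : Arena} {A : Arena × List Obj} {lengths j : Nat} {v : State}
    (hat : InC4 u₀ g i A2 A3 Ai A lengths j v) :
    ReachVia Lay μ WayInv v (fun w => AtC5 u₀ g i w ∨
        InC4Mid u₀ g i A2 A3 Ai A lengths (C4.entriesOf g i v) j Vorbis.L.start_decoder.cut123 w ∨
        InC4Mid u₀ g i A2 A3 Ai A lengths (C4.entriesOf g i v) j Vorbis.L.start_decoder.cut121 w) := by
  have hfr := hat.frame
  have he := hfr.entry
  v_entry he
  simp only [depth] at he_room he_stack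
  have w_rip := hfr.rip
  obtain ⟨hr1, hr2⟩ := hfr.r_eq
  simp only [steady] at hr1
  have hRA : g.RA = (g.e.reg .rsp).toNat := rfl
  have c_rsp : v.reg .rsp = g.e.reg .rsp - 1480 := by
    rw [hfr.rsp]
    refine (eq_addr _ _ ?_).symm
    unfold Ghost.R Ghost.RA steady
    u_omega
  -- the struct `c = cb(i)`: inside the codebooks block, a setup block of the arena
  have ha := hat.cur.sd.arena
  have hcb := hat.cur.ages.cbOK
  have hBA : A.1.Blk (codebooksBlock v.mem g.f) := hcb.F2.mono hat.cur.ages.exti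
  have hcin := hcb.cb_in i hat.cur.lt
  have hboff := ha.block_off hBA
  have hbin := arena_inside ha hBA
  have hbnd := ha.bounds
  simp only [vblock, Off.sizeof.Codebook] at hcin hboff hbin
  have hcdef : stb_vorbis.codebooks_at v.mem g.f i = g.cb v.mem i := rfl
  rw [hcdef] at hcin
  have c_r14n : (v.reg .r14).toNat = g.cb v.mem i := by
    rw [hat.cur.r14]
    exact toNat_addr _ (by omega)
  have hBA' : A.1.Block (stb_vorbis.codebooks v.mem g.f) (2120 * (stb_vorbis.codebook_count v.mem g.f).toNat) := hBA
  have e4 : v.reg .r14 + 4 = addr (g.cb v.mem i + 4) := by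
    rw [hat.cur.r14]
    exact Vorbis.addr_add_lit _ 4
  have e27 : v.reg .r14 + 27 = addr (g.cb v.mem i + 27) := by
    rw [hat.cur.r14]
    exact Vorbis.addr_add_lit _ 27
  have t4 : (v.reg .r14 + 4).toNat = g.cb v.mem i + 4 := by
    rw [e4]
    exact toNat_addr _ (by omega)
  have t27 : (v.reg .r14 + 27).toNat = g.cb v.mem i + 27 := by
    rw [e27]
    exact toNat_addr _ (by omega)
  have hent : (BitVec.ofNat 32 (v.mem.readLE (v.reg .r14 + 4) 4)).toInt = Codebook.entries v.mem (g.cb v.mem i) := by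
    rw [e4]
    exact Mem.toInt_ofNat32_u32 v.mem _
  have hj31 : j < 2 ^ 31 := by
    have := hat.k1.ent_lt
    have := hat.j_le
    omega
  have hjint : (Word.part .w32 (UInt64.ofNat j)).toInt = (j : Int) := Vorbis.Spec.cnt32_part_toInt j hj31
  have hout := hat.cur.hand.objOut
  simp only [voff] at hout
  have hobr := hat.cur.sd.bits.OBR
  simp only [voff] at hobr
  have t1 : (g.e.reg .rsp - 1488).toNat = (g.e.reg .rsp).toNat - 1488 := by u_omega
  have c_r12 : v.reg .r12 = UInt64.ofNat j := hat.r12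
  have c_rbx := hat.rbx
  have c_rbp := hat.rbp
  have sl_f : v.mem.readLE (g.e.reg .rsp - 1456) 8 = g.f := by
    have e : addr (g.R + 0x18) = g.e.reg .rsp - 1456 := by
      refine (eq_addr _ _ ?_).symm
      unfold Ghost.R Ghost.RA steady
      u_omega
    rw [← e]
    exact hat.cur.slot_f
  have hst := C4.obj_stack hfr hat.cur.hand
  have htx := hat.cur.hand.arenaText
  simp only [Vorbis.L.textHi] at htx
  have w_eq : Mem.EqOn Vorbis.L.textLo Vorbis.L.textHi u₀.mem v.mem := hfr.code
  have hdf : v.flags .df = false := (show abiInv _ from hfr.inv).1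
  have hmx : v.mxcsr &&& 0x1F80 = 0x1F80 := (show abiInv _ from hfr.inv).2
  have hsse := Vorbis.sseOK_of_abiInv hfr.inv
  have hgb' := hgb A.2 g.frames' (g.Blk A) g.len
  u_walk hcode [hμ.vendor] until [Vorbis.L.start_decoder.cut109, Vorbis.L.start_decoder.cut123, Vorbis.L.start_decoder.cut121] span [Vorbis.L.textLo, Vorbis.L.textHi] side (v_side)
  case check_1147c7 =>
    -- 0x1147c7: the 4 bytes of `c->entries` at `c + 4`, inside the codebooks block (a live setup block)
    have hun : ShadowUntouched v.mem s_1147c7.mem := by v_untouched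
    have hsh' := hfr.shadow.untouched hun
    refine ⟨hsh'.sealed, ?_⟩
    rw [t4]
    exact ha.block_acc_inv hsh' hBA' (by omega) (by omega) (by decide)
  case check_1147da =>
    -- 0x1147da: the byte `c->sparse` at `c + 27`
    have hun : ShadowUntouched v.mem s_1147da.mem := by v_untouched
    have hsh' := hfr.shadow.untouched hun
    refine ⟨hsh'.sealed, ?_⟩
    rw [t27]
    exact ha.block_acc_inv hsh' hBA' (by omega) (by omega) (by decide)
  case call_inv => v_inv
  case pre_11479c =>
    have hun : ShadowUntouched v.mem s_11479c.mem := by v_untouched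
    refine ⟨C4.reader_pre hfr hat.cur hun ?_ ?_ ?_, ?_⟩
    · rw [w_rsp, t1]
      omega
    · rw [w_rdi]
      rfl
    · rw [w_mem]
      exact Mem.eqOn_writeLE v.mem _ 8 _ g.f 1808 (by rw [t1]; omega) (by rw [t1]; omega)
    · rw [bitsArg_def, w_rsi]
      decide
  case call_inv => v_inv
  case pre_1147f0 =>
    have hun : ShadowUntouched v.mem s_1147f0.mem := by v_untouched
    refine ⟨C4.reader_pre hfr hat.cur hun ?_ ?_ ?_, ?_⟩
    · rw [w_rsp, t1]
      omega
    · rw [w_rdi]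
      rfl
    · rw [w_mem]
      exact Mem.eqOn_writeLE v.mem _ 8 _ g.f 1808 (by rw [t1]; omega) (by rw [t1]; omega)
    · rw [bitsArg_def, w_rsi]
      decide
  · -- `j ≥ c->entries`: the loop is over, `AtC5`
    rw [hent, hjint] at hbr_1147d0
    have hjle := hat.j_le
    have hjE : (Codebook.entries v.mem (g.cb v.mem i)).toNat = j := by omega
    have hsame : Mem.SameExcept [⟨g.R - 408, g.R⟩] v.mem s_1147d0.mem := by
      rw [w_mem]
      refine Mem.SameExcept.writeLE _ v.mem _ 8 _ ?_ ⟨⟨g.R - 408, g.R⟩, List.mem_cons_self, ?_, ?_⟩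
      · rw [t1]
        omega
      · rw [t1]
        show g.R - 408 ≤ _
        omega
      · rw [t1]
        show _ ≤ g.R
        omega
    have hag : C4.Agree g.R g.f A.1.B 0 v.mem s_1147d0.mem := by
      apply C4.Agree.of_sameExcept hsame
      intro w hw
      simp only [List.mem_cons, List.not_mem_nil, or_false] at hw
      rw [hw]
      left
      exact ⟨Nat.le_refl _, Nat.le_refl _⟩
    have heq : Mem.EqOn g.f (g.f + 1808) v.mem s_1147d0.mem := by
      apply hsame.eqOn
      intro w hw
      simp only [List.mem_cons, List.not_mem_nil, or_false] at hw
      rw [hw]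
      show g.f + 1808 ≤ g.R - 408 ∨ g.R ≤ g.f
      exact hst
    have habi : abiInv s_1147d0 := by
      refine Vorbis.abiInv_of ?_ ?_
      · rw [w_flags]
        simp only [X86.User.df_setStatus]
        exact w_df_1147c7
      · rw [w_mxcsr]
        exact hmx
    have hrsp : s_1147d0.reg .rsp = v.reg .rsp := by
      rw [w_rsp, c_rsp]
    exact ReachVia.done (Or.inl (c4a_exit_c5 hat hjE hag (C4.bits_same hat.cur heq) w_rip hrsp habi (w_kept .rbp rfl)
      (w_kept .rbx rfl) (w_kept .r14 rfl)))
  · -- the return of `get_bits(f, 5)`: `InC4Mid` at `cut121`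
    v_after_call w_rsp_11479c w_mem_11479c
    rw [hent, hjint] at hbr_1147d0
    have hf : (s_11479c.reg .rdi).toNat = g.f := by
      rw [w_rdi_11479c]
      exact toNat_addr g.f (by omega)
    simp only [hf, t1] at w_same
    have hpush : Mem.SameExcept [⟨g.R - 408, g.R⟩] v.mem (v.mem.writeLE (g.e.reg .rsp - 1488) 8 1132449) := by
      refine Mem.SameExcept.writeLE _ v.mem _ 8 _ ?_ ⟨⟨g.R - 408, g.R⟩, List.mem_cons_self, ?_, ?_⟩
      · rw [t1]
        omega
      · rw [t1]
        show g.R - 408 ≤ _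
        omega
      · rw [t1]
        show _ ≤ g.R
        omega
    have hag1 : C4.Agree g.R g.f A.1.B 0 v.mem (v.mem.writeLE (g.e.reg .rsp - 1488) 8 1132449) := by
      apply C4.Agree.of_sameExcept hpush
      intro w hw
      simp only [List.mem_cons, List.not_mem_nil, or_false] at hw
      rw [hw]
      left
      exact ⟨Nat.le_refl _, Nat.le_refl _⟩
    have hag2 : C4.Agree g.R g.f A.1.B 0 (v.mem.writeLE (g.e.reg .rsp - 1488) 8 1132449) s_11479cr.mem := by
      apply C4.Agree.of_sameExcept w_same
      intro w hw
      simp only [List.mem_cons, List.not_mem_nil, or_false] at hw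
      rcases hw with rfl | rfl | rfl | rfl | rfl | rfl
      · left
        dsimp only
        omega
      · right; left
        exact ⟨Nat.le_refl _, Nat.le_refl _⟩
      · right; right; left
        exact ⟨Nat.le_refl _, Nat.le_refl _⟩
      · right; right; right; left
        exact ⟨Nat.le_refl _, Nat.le_refl _⟩
      · right; right; right; right; left
        exact ⟨Nat.le_refl _, Nat.le_refl _⟩
      · right; right; right; right; right; left
        exact ⟨Nat.le_refl _, Nat.le_refl _⟩
    have hag := hag1.trans hag2
    have hp : GetBitsSpecPost (g.Blk A) g.len (s_11479c.reg .rdi).toNat (bitsArg s_11479c) s_11479c s_11479cr := w_post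
    have hbits := hp.bits.bits
    rw [hf] at hbits
    have habi : abiInv s_11479cr := Vorbis.abiInv_of w_df w_mx
    have hrsp : s_11479cr.reg .rsp = v.reg .rsp := by
      rw [w_rsp, c_rsp]
    have hjv : j < C4.entriesOf g i v := by
      unfold C4.entriesOf
      omega
    have harg : bitsArg s_11479c = 5 := by
      rw [bitsArg_def, w_rsi_11479c]
      decide
    have hres := hp.bits.result
    rw [harg] at hres
    have hrax : Vorbis.L.start_decoder.cut121 = Vorbis.L.start_decoder.cut121 → (s_11479cr.reg .rax).toNat < 32 := by
      intro _
      unfold GetBitsResult at hres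
      omega
    have hm := C4.mid_of_call (pc' := Vorbis.L.start_decoder.cut121) hfr hat.cur hat.k1 hat.lenL hat.place hat.fresh hjv hag hbits
      w_rip hrsp habi ((w_kept .r12 rfl).trans hat.r12) ((w_kept .rbp rfl).trans c_rbp) ((w_kept .rbx rfl).trans c_rbx)
      (w_kept .r14 rfl) hrax
    exact ReachVia.done (Or.inr (Or.inr hm))
  · -- the return of `get_bits(f, 1)`: `InC4Mid` at `cut123`
    v_after_call w_rsp_1147f0 w_mem_1147f0
    rw [hent, hjint] at hbr_1147d0
    have hf : (s_1147f0.reg .rdi).toNat = g.f := by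
      rw [w_rdi_1147f0]
      exact toNat_addr g.f (by omega)
    simp only [hf, t1] at w_same
    have hpush : Mem.SameExcept [⟨g.R - 408, g.R⟩] v.mem (v.mem.writeLE (g.e.reg .rsp - 1488) 8 1132533) := by
      refine Mem.SameExcept.writeLE _ v.mem _ 8 _ ?_ ⟨⟨g.R - 408, g.R⟩, List.mem_cons_self, ?_, ?_⟩
      · rw [t1]
        omega
      · rw [t1]
        show g.R - 408 ≤ _
        omega
      · rw [t1]
        show _ ≤ g.R
        omega
    have hag1 : C4.Agree g.R g.f A.1.B 0 v.mem (v.mem.writeLE (g.e.reg .rsp - 1488) 8 1132533) := by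
      apply C4.Agree.of_sameExcept hpush
      intro w hw
      simp only [List.mem_cons, List.not_mem_nil, or_false] at hw
      rw [hw]
      left
      exact ⟨Nat.le_refl _, Nat.le_refl _⟩
    have hag2 : C4.Agree g.R g.f A.1.B 0 (v.mem.writeLE (g.e.reg .rsp - 1488) 8 1132533) s_1147f0r.mem := by
      apply C4.Agree.of_sameExcept w_same
      intro w hw
      simp only [List.mem_cons, List.not_mem_nil, or_false] at hw
      rcases hw with rfl | rfl | rfl | rfl | rfl | rfl
      · left
        dsimp only
        omega
      · right; left
        exact ⟨Nat.le_refl _, Nat.le_refl _⟩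
      · right; right; left
        exact ⟨Nat.le_refl _, Nat.le_refl _⟩
      · right; right; right; left
        exact ⟨Nat.le_refl _, Nat.le_refl _⟩
      · right; right; right; right; left
        exact ⟨Nat.le_refl _, Nat.le_refl _⟩
      · right; right; right; right; right; left
        exact ⟨Nat.le_refl _, Nat.le_refl _⟩
    have hag := hag1.trans hag2
    have hp : GetBitsSpecPost (g.Blk A) g.len (s_1147f0.reg .rdi).toNat (bitsArg s_1147f0) s_1147f0 s_1147f0r := w_post
    have hbits := hp.bits.bits
    rw [hf] at hbits
    have habi : abiInv s_1147f0r := Vorbis.abiInv_of w_df w_mx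
    have hrsp : s_1147f0r.reg .rsp = v.reg .rsp := by
      rw [w_rsp, c_rsp]
    have hjv : j < C4.entriesOf g i v := by
      unfold C4.entriesOf
      omega
    have hrax : Vorbis.L.start_decoder.cut123 = Vorbis.L.start_decoder.cut121 → (s_1147f0r.reg .rax).toNat < 32 :=
      fun e => absurd e (by decide)
    have hm := C4.mid_of_call (pc' := Vorbis.L.start_decoder.cut123) hfr hat.cur hat.k1 hat.lenL hat.place hat.fresh hjv hag hbits
      w_rip hrsp habi ((w_kept .r12 rfl).trans hat.r12) ((w_kept .rbp rfl).trans c_rbp) ((w_kept .rbx rfl).trans c_rbx)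
      (w_kept .r14 rfl) hrax
    exact ReachVia.done (Or.inr (Or.inl hm))

end Vorbis.Spec.start_decoder_C4a

/-- The unit `start_decoder.C4a`: `segC4a_walk` at every entry state. -/
theorem Vorbis.Spec.Worked.start_decoder_C4a_ok : Vorbis.Spec.start_decoder_C4a.Statement := by
  intro Lay hLay μ hμ u₀ hcode hgb hld4 hld1 g i A2 A3 Ai A lengths j v hat
  exact Vorbis.Spec.start_decoder_C4a.segC4a_walk hLay hμ hcode hgb hld4 hld1 hat
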